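-- pv_equiv track=rewrite | github.com/alvarovergaravargas/observatoriolegislativopanama | scraper.py | encontrar_diputado
-- ===== SOURCE A (Python) =====
-- def encontrar_diputado(pn, dip_norm):
--     for dn, d in dip_norm:
--         if dn == pn: return d
--     for dn, d in dip_norm:
--         ap = ' '.join(dn.split()[-2:])
--         if len(ap) > 4 and ap in pn: return d
--     for dn, d in dip_norm:
--         w = dn.split(); wp = pn.split()
--         if len(w) >= 2 and w[-1] in wp and w[0] in wp: return d
--     return None
-- ===== SOURCE B (Python) =====
-- def encontrar_diputado(pn, dip_norm):
--     # One pass: exact match returns immediately; first suffix-tier and first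
--     # word-tier candidates are remembered and used after the scan.
--     wp = pn.split()
--     suf = None
--     word = None
--     for dn, d in dip_norm:
--         if dn == pn:
--             return d
--         if suf is None:
--             ap = ' '.join(dn.split()[-2:])
--             if len(ap) > 4 and ap in pn:
--                 suf = d
--         if word is None:
--             w = dn.split()
--             if len(w) >= 2 and w[-1] in wp and w[0] in wp:
--                 word = d
--     return suf if suf is not None else word
-- ===== Notes on version B (the rewrite author's own statement) =====
-- stated objective: faster
-- what changed: A's three sequential full scans (exact, then suffix tier, then word tier) are merged into a single scan that returns immediately on an exact match and records the first candidate of each lower tier in accumulators, chosen by priority after the loop; pn.split() is computed once instead of per element.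
import Mathlib
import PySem

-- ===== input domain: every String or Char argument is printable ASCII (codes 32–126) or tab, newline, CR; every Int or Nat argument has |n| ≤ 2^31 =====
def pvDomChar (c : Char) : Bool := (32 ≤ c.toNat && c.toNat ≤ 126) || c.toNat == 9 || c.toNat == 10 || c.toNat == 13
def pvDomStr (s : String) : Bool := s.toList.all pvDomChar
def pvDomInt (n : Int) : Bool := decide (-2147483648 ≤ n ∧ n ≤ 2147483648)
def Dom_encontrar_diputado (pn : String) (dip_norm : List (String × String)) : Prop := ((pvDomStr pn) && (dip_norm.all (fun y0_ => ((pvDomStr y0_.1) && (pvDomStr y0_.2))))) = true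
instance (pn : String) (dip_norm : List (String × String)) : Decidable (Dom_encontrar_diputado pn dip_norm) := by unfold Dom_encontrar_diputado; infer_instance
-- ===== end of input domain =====

-- B replaces A's three sequential full scans by a single scan that records the
-- first candidate of each lower tier (objective: alternative decomposition, one pass).

-- shared guard predicates (transcribed from the source conditions; used verbatim by both ports)
def edSufCond (pn dn : String) : Bool :=
  let ap := PySem.Str.join " " (PySem.List.slice (PySem.Str.split₀ dn) (some (-2)) none)
  4 < PySem.Str.len ap && PySem.Str.isIn ap pn

def edWordCond (wp : List String) (dn : String) : Bool :=
  let w := PySem.Str.split₀ dn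
  decide (2 ≤ w.length) && wp.contains ((PySem.List.pyGet? w (-1)).getD "")
    && wp.contains ((PySem.List.pyGet? w 0).getD "")

-- ===== PORT A =====
-- first loop: exact match
def edA1 (pn : String) : List (String × String) → Option String
  | [] => none
  | (dn, d) :: rest => if dn == pn then some d else edA1 pn rest

-- second loop: ap = ' '.join(dn.split()[-2:]); len(ap) > 4 and ap in pn
def edA2 (pn : String) : List (String × String) → Option String
  | [] => none
  | (dn, d) :: rest =>
      if edSufCond pn dn then some d else edA2 pn rest

-- third loop: w = dn.split(); wp = pn.split(); len(w) >= 2 and w[-1] in wp and w[0] in wp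
def edA3 (pn : String) : List (String × String) → Option String
  | [] => none
  | (dn, d) :: rest =>
      if edWordCond (PySem.Str.split₀ pn) dn then some d else edA3 pn rest

def encontrar_diputado (pn : String) (dip_norm : List (String × String)) : Option String :=
  match edA1 pn dip_norm with
  | some d => some d
  | none =>
    match edA2 pn dip_norm with
    | some d => some d
    | none => edA3 pn dip_norm

-- ===== PORT B =====
-- one pass; suf/word hold the first candidate of each lower tier
def edBLoop (pn : String) (wp : List String) :
    List (String × String) → Option String → Option String → Option String
  | [], suf, word => match suf with | some s => some s | none => word
  | (dn, d) :: rest, suf, word =>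
      if dn == pn then some d
      else
        let suf' :=
          match suf with
          | some s => some s
          | none => if edSufCond pn dn then some d else none
        let word' :=
          match word with
          | some t => some t
          | none => if edWordCond wp dn then some d else none
        edBLoop pn wp rest suf' word'

def encontrar_diputado_alt (pn : String) (dip_norm : List (String × String)) : Option String :=
  edBLoop pn (PySem.Str.split₀ pn) dip_norm none none

-- ===== PRECONDITION & SPEC =====
def Spec_encontrar_diputado (pn : String) (dip_norm : List (String × String)) (out : Option String) : Prop := out = encontrar_diputado_alt pn dip_norm
instance (pn : String) (dip_norm : List (String × String)) (out : Option String) : Decidable (Spec_encontrar_diputado pn dip_norm out) := by unfold Spec_encontrar_diputado; infer_instance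

-- ===== CLAIM (what is proved, stated in full; the proofs are below) =====
def Claim_equal_encontrar_diputado : Prop := ∀ (pn : String) (dip_norm : List (String × String)), Dom_encontrar_diputado pn dip_norm → Spec_encontrar_diputado pn dip_norm (encontrar_diputado pn dip_norm)

-- ===== LEMMAS AND PROOFS =====
-- invariant: the one-pass loop with accumulators equals the three-scan cascade
theorem edBLoop_eq (pn : String) (xs : List (String × String)) :
    ∀ (suf word : Option String),
      edBLoop pn (PySem.Str.split₀ pn) xs suf word =
        match edA1 pn xs with
        | some d => some d
        | none =>
          match (match suf with | some s => some s | none => edA2 pn xs) with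
          | some s => some s
          | none => match word with | some t => some t | none => edA3 pn xs := by
  induction xs with
  | nil =>
      intro suf word
      cases suf <;> cases word <;> simp [edBLoop, edA1, edA2, edA3]
  | cons hd rest ih =>
      intro suf word
      obtain ⟨dn, d⟩ := hd
      by_cases hx : (dn == pn) = true
      · cases suf <;> simp [edBLoop, edA1, hx]
      · simp only [edBLoop, edA1, edA2, edA3, hx, Bool.false_eq_true, if_false]
        rw [ih]
        cases suf <;> cases word <;>
          cases h2 : edSufCond pn dn <;> cases h3 : edWordCond (PySem.Str.split₀ pn) dn <;>
          simp_all

-- ===== VERDICT (by name: the statement is the Claim_ definition above) =====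
theorem encontrar_diputado_spec : Claim_equal_encontrar_diputado := by
  intro pn dip_norm _
  unfold Spec_encontrar_diputado encontrar_diputado encontrar_diputado_alt
  rw [edBLoop_eq]
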